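-- pv_equiv track=rewrite | github.com/movemaxlg-boop/pcb-engine | pcb_engine/old/loose_files/routing_engine.py | _mikami_reconstruct_path
-- ===== SOURCE A (Python) =====
-- from typing import Dict, List, Tuple, Optional, Set, Any
--
-- def _mikami_reconstruct_path(start_row: int, start_col: int,
--                               end_row: int, end_col: int,
--                               intersect: Tuple[int, int]) -> List[Tuple[int, int]]:
--     """Reconstruct path through intersection point"""
--     int_row, int_col = intersect
--
--     # Path: start -> intersect -> end (L-shape or Z-shape)
--     path = []
--
--     # Start to intersection
--     if start_row == int_row:
--         # Same row - horizontal first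
--         step = 1 if int_col > start_col else -1
--         for c in range(start_col, int_col + step, step):
--             path.append((start_row, c))
--     else:
--         # Different row - go vertical then horizontal
--         step_r = 1 if int_row > start_row else -1
--         for r in range(start_row, int_row + step_r, step_r):
--             path.append((r, start_col))
--         step_c = 1 if int_col > start_col else -1
--         for c in range(start_col + step_c, int_col + step_c, step_c):
--             path.append((int_row, c))
--
--     # Intersection to end (avoid duplicating intersection)
--     if int_row == end_row:
--         # Same row - horizontal
--         step = 1 if end_col > int_col else -1
--         for c in range(int_col + step, end_col + step, step):
--             path.append((end_row, c))
--     else: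
--         # Go vertical then horizontal
--         step_r = 1 if end_row > int_row else -1
--         for r in range(int_row + step_r, end_row + step_r, step_r):
--             path.append((r, int_col))
--         if int_col != end_col:
--             step_c = 1 if end_col > int_col else -1
--             for c in range(int_col + step_c, end_col + step_c, step_c):
--                 path.append((end_row, c))
--
--     return path if path else None
-- ===== SOURCE B (Python) =====
-- from typing import Tuple, List
--
--
-- def _fill(p, q):
--     """Cells from p (inclusive) to q (exclusive) along the single differing axis."""
--     (r1, c1), (r2, c2) = p, q
--     cells = []
--     if r1 != r2:
--         s = 1 if r2 > r1 else -1
--         r = r1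
--         while r != r2:
--             cells.append((r, c1))
--             r += s
--     elif c1 != c2:
--         s = 1 if c2 > c1 else -1
--         c = c1
--         while c != c2:
--             cells.append((r1, c))
--             c += s
--     return cells
--
--
-- def _mikami_reconstruct_path(start_row: int, start_col: int,
--                               end_row: int, end_col: int,
--                               intersect: Tuple[int, int]) -> List[Tuple[int, int]]:
--     int_row, int_col = intersect
--     pts = [(start_row, start_col), (int_row, start_col), (int_row, int_col),
--            (end_row, int_col), (end_row, end_col)]
--     path = []
--     for p, q in zip(pts, pts[1:]):
--         path.extend(_fill(p, q))
--     path.append(pts[-1])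
--     return path or None
-- ===== Notes on version B (the rewrite author's own statement) =====
-- stated objective: simpler
-- what changed: B replaces A's four branch-specific inclusive/exclusive range loops by computing the five waypoints of the L/Z path and filling every consecutive waypoint pair with one uniform single-axis walk helper, then appending the end cell once.
import Mathlib
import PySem

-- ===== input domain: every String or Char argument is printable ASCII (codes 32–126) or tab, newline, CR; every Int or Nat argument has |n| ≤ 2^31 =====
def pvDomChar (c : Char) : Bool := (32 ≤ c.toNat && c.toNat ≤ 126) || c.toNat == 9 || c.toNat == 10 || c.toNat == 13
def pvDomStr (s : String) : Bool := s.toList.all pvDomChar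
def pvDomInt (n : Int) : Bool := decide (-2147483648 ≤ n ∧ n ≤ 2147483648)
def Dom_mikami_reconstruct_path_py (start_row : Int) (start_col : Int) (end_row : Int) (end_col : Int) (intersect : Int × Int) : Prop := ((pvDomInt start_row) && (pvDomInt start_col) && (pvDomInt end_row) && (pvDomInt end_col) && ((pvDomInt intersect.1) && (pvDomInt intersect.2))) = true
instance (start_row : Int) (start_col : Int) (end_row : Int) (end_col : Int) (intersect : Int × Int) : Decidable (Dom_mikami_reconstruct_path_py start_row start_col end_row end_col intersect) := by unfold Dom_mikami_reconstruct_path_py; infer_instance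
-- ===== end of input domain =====

-- B builds the five waypoints of the L/Z path and fills each leg with one uniform
-- single-axis walk helper instead of A's four branch-specific range loops (objective: simpler).

-- ===== PORT A =====
def mikami_reconstruct_path_py (start_row : Int) (start_col : Int) (end_row : Int) (end_col : Int) (intersect : Int × Int) : Option (List (Int × Int)) :=
  let int_row := intersect.1
  let int_col := intersect.2
  -- start to intersection
  let path1 : List (Int × Int) :=
    if start_row = int_row then
      (PySem.List.pyRange start_col (int_col + (if int_col > start_col then 1 else -1)) (if int_col > start_col then 1 else -1)).map (fun c => (start_row, c))
    else
      (PySem.List.pyRange start_row (int_row + (if int_row > start_row then 1 else -1)) (if int_row > start_row then 1 else -1)).map (fun r => (r, start_col))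
      ++ (PySem.List.pyRange (start_col + (if int_col > start_col then 1 else -1)) (int_col + (if int_col > start_col then 1 else -1)) (if int_col > start_col then 1 else -1)).map (fun c => (int_row, c))
  -- intersection to end (avoid duplicating intersection)
  let path2 : List (Int × Int) :=
    if int_row = end_row then
      (PySem.List.pyRange (int_col + (if end_col > int_col then 1 else -1)) (end_col + (if end_col > int_col then 1 else -1)) (if end_col > int_col then 1 else -1)).map (fun c => (end_row, c))
    else
      (PySem.List.pyRange (int_row + (if end_row > int_row then 1 else -1)) (end_row + (if end_row > int_row then 1 else -1)) (if end_row > int_row then 1 else -1)).map (fun r => (r, int_col))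
      ++ (if int_col ≠ end_col then
            (PySem.List.pyRange (int_col + (if end_col > int_col then 1 else -1)) (end_col + (if end_col > int_col then 1 else -1)) (if end_col > int_col then 1 else -1)).map (fun c => (end_row, c))
          else [])
  let path := path1 ++ path2
  if path.isEmpty then none else some path

-- ===== PORT B =====
-- walk of n unit steps from (r, c) in direction (dr, dc): the counted form of B's while-loop
def pvWalk (r : Int) (c : Int) (dr : Int) (dc : Int) : Nat → List (Int × Int)
  | 0 => []
  | n+1 => (r, c) :: pvWalk (r + dr) (c + dc) dr dc n

def pvFill (p : Int × Int) (q : Int × Int) : List (Int × Int) :=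
  if p.1 ≠ q.1 then
    pvWalk p.1 p.2 (if q.1 > p.1 then 1 else -1) 0 (q.1 - p.1).natAbs
  else if p.2 ≠ q.2 then
    pvWalk p.1 p.2 0 (if q.2 > p.2 then 1 else -1) (q.2 - p.2).natAbs
  else []

def mikami_reconstruct_path_py_alt (start_row : Int) (start_col : Int) (end_row : Int) (end_col : Int) (intersect : Int × Int) : Option (List (Int × Int)) :=
  let int_row := intersect.1
  let int_col := intersect.2
  let pts : List (Int × Int) := [(start_row, start_col), (int_row, start_col), (int_row, int_col), (end_row, int_col), (end_row, end_col)]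
  let path := (pts.zip pts.tail).foldl (fun acc pq => acc ++ pvFill pq.1 pq.2) [] ++ [(end_row, end_col)]
  if path.isEmpty then none else some path

-- ===== PRECONDITION & SPEC =====
def Spec_mikami_reconstruct_path_py (start_row : Int) (start_col : Int) (end_row : Int) (end_col : Int) (intersect : Int × Int) (out : Option (List (Int × Int))) : Prop := out = mikami_reconstruct_path_py_alt start_row start_col end_row end_col intersect
instance (start_row : Int) (start_col : Int) (end_row : Int) (end_col : Int) (intersect : Int × Int) (out : Option (List (Int × Int))) : Decidable (Spec_mikami_reconstruct_path_py start_row start_col end_row end_col intersect out) := by unfold Spec_mikami_reconstruct_path_py; infer_instance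

-- ===== CLAIM (what is proved, stated in full; the proofs are below) =====
def Claim_equal_mikami_reconstruct_path_py : Prop := ∀ (start_row : Int) (start_col : Int) (end_row : Int) (end_col : Int) (intersect : Int × Int), Dom_mikami_reconstruct_path_py start_row start_col end_row end_col intersect → Spec_mikami_reconstruct_path_py start_row start_col end_row end_col intersect (mikami_reconstruct_path_py start_row start_col end_row end_col intersect)

-- ===== LEMMAS AND PROOFS =====

-- n values a, a+s, …, a+s*(n-1)
def rList (a : Int) (s : Int) : Nat → List Int
  | 0 => []
  | n+1 => a :: rList (a + s) s n

-- the cells strictly between a and b (from a inclusive toward b exclusive)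
def seg (a : Int) (b : Int) : List Int := rList a (if b > a then 1 else -1) (b - a).natAbs

lemma rList_snoc : ∀ (n : Nat) (a s : Int), rList a s (n+1) = rList a s n ++ [a + s * n] := by
  intro n
  induction n with
  | zero => intro a s; simp [rList]
  | succ m ih =>
    intro a s
    show a :: rList (a + s) s (m+1) = (a :: rList (a + s) s m) ++ _
    rw [ih]
    simp [mul_add]
    ring_nf

lemma pyRange_up : ∀ (n : Nat) (a : Int), PySem.List.pyRange a (a + n) 1 = rList a 1 n := by
  intro n
  induction n with
  | zero => intro a; simp [rList, PySem.List.pyRange_one_eq_nil]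
  | succ m ih =>
    intro a
    rw [PySem.List.pyRange_one_cons (by push_cast; omega)]
    have : a + ((m : Int) + 1) = (a + 1) + m := by ring
    push_cast
    rw [this, ih]
    rfl

lemma pyRange_dn : ∀ (n : Nat) (a : Int), PySem.List.pyRange a (a - n) (-1) = rList a (-1) n := by
  intro n
  induction n with
  | zero => intro a; simp [rList, PySem.List.pyRange_neg_one_eq_nil]
  | succ m ih =>
    intro a
    rw [PySem.List.pyRange_neg_one_cons (by push_cast; omega)]
    have : a - ((m : Int) + 1) = (a - 1) - m := by ring
    push_cast
    rw [this, ih]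
    rfl

lemma incl (a b : Int) :
    PySem.List.pyRange a (b + (if b > a then 1 else -1)) (if b > a then 1 else -1) = seg a b ++ [b] := by
  by_cases h : b > a
  · simp only [seg, if_pos h]
    have hn : b + 1 = a + ((b - a).natAbs + 1 : Nat) := by omega
    rw [hn, pyRange_up, rList_snoc]
    have : a + 1 * ((b - a).natAbs : Int) = b := by omega
    rw [this]
  · simp only [seg, if_neg h]
    have hn : b + (-1) = a - ((b - a).natAbs + 1 : Nat) := by omega
    rw [hn, pyRange_dn, rList_snoc]
    have : a + (-1) * ((b - a).natAbs : Int) = b := by omega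
    rw [this]

lemma excl (a b : Int) :
    a :: PySem.List.pyRange (a + (if b > a then 1 else -1)) (b + (if b > a then 1 else -1)) (if b > a then 1 else -1)
      = seg a b ++ [b] := by
  rw [← incl a b]
  by_cases h : b > a
  · simp only [if_pos h]
    exact (PySem.List.pyRange_one_cons (by omega)).symm
  · simp only [if_neg h]
    exact (PySem.List.pyRange_neg_one_cons (by omega)).symm

lemma seg_self (a : Int) : seg a a = [] := by
  simp [seg, rList]

lemma walk_row : ∀ (n : Nat) (r c dr : Int), pvWalk r c dr 0 n = (rList r dr n).map (fun x => (x, c)) := by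
  intro n
  induction n with
  | zero => intro r c dr; rfl
  | succ m ih => intro r c dr; simp [pvWalk, rList, ih]

lemma walk_col : ∀ (n : Nat) (r c dc : Int), pvWalk r c 0 dc n = (rList c dc n).map (fun x => (r, x)) := by
  intro n
  induction n with
  | zero => intro r c dc; rfl
  | succ m ih => intro r c dc; simp [pvWalk, rList, ih]

lemma fill_eq (r1 c1 r2 c2 : Int) :
    pvFill (r1, c1) (r2, c2) =
      if r1 ≠ r2 then (seg r1 r2).map (fun x => (x, c1)) else (seg c1 c2).map (fun x => (r1, x)) := by
  by_cases h : r1 = r2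
  · subst h
    by_cases hc : c1 = c2
    · subst hc; simp [pvFill, seg_self]
    · simp [pvFill, hc, walk_col, seg]
  · simp [pvFill, h, walk_row, seg]

-- the canonical path both programs compute
def canon (sr sc er ec ir ic : Int) : List (Int × Int) :=
  (seg sr ir).map (fun x => (x, sc)) ++ (seg sc ic).map (fun x => (ir, x)) ++
  (seg ir er).map (fun x => (x, ic)) ++ (seg ic ec).map (fun x => (er, x)) ++ [(er, ec)]

lemma b_path (sr sc er ec ir ic : Int) :
    ([((sr, sc), (ir, sc)), ((ir, sc), (ir, ic)), ((ir, ic), (er, ic)), ((er, ic), (er, ec))].foldl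
        (fun acc pq => acc ++ pvFill pq.1 pq.2) []) ++ [(er, ec)] = canon sr sc er ec ir ic := by
  simp only [List.foldl, List.nil_append]
  by_cases h1 : sr = ir <;> by_cases h2 : ir = er <;>
    simp [fill_eq, h1, h2, canon, seg_self, List.append_assoc] <;>
    omega

lemma a_path (sr sc er ec ir ic : Int) :
    ((if sr = ir then
        (PySem.List.pyRange sc (ic + (if ic > sc then 1 else -1)) (if ic > sc then 1 else -1)).map (fun c => (sr, c))
      else
        (PySem.List.pyRange sr (ir + (if ir > sr then 1 else -1)) (if ir > sr then 1 else -1)).map (fun r => (r, sc))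
        ++ (PySem.List.pyRange (sc + (if ic > sc then 1 else -1)) (ic + (if ic > sc then 1 else -1)) (if ic > sc then 1 else -1)).map (fun c => (ir, c))) ++
     (if ir = er then
        (PySem.List.pyRange (ic + (if ec > ic then 1 else -1)) (ec + (if ec > ic then 1 else -1)) (if ec > ic then 1 else -1)).map (fun c => (er, c))
      else
        (PySem.List.pyRange (ir + (if er > ir then 1 else -1)) (er + (if er > ir then 1 else -1)) (if er > ir then 1 else -1)).map (fun r => (r, ic))
        ++ (if ic ≠ ec then
              (PySem.List.pyRange (ic + (if ec > ic then 1 else -1)) (ec + (if ec > ic then 1 else -1)) (if ec > ic then 1 else -1)).map (fun c => (er, c))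
            else []))) = canon sr sc er ec ir ic := by
  have exmL : ∀ (a b : Int) (f : Int → (Int × Int)) (L : List (Int × Int)),
      f a :: ((PySem.List.pyRange (a + (if b > a then 1 else -1)) (b + (if b > a then 1 else -1)) (if b > a then 1 else -1)).map f ++ L)
        = (seg a b).map f ++ (f b :: L) := by
    intro a b f L
    have h := congrArg (fun t => (List.map f t) ++ L) (excl a b)
    simpa using h
  have exm : ∀ (a b : Int) (f : Int → (Int × Int)),
      f a :: (PySem.List.pyRange (a + (if b > a then 1 else -1)) (b + (if b > a then 1 else -1)) (if b > a then 1 else -1)).map f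
        = (seg a b).map f ++ [f b] := by
    intro a b f
    have h := congrArg (List.map f) (excl a b)
    simpa using h
  by_cases h1 : sr = ir <;> by_cases h2 : ir = er
  · -- sr = ir, ir = er
    subst h1; subst h2
    rw [if_pos rfl, if_pos rfl, incl]
    simp only [canon, seg_self, List.map_nil, List.nil_append, List.map_append,
      List.map_cons, List.map_nil, List.append_assoc, List.cons_append]
    rw [exm ic ec (fun c => (sr, c))]
  · -- sr = ir, ir ≠ er
    subst h1
    rw [if_pos rfl, if_neg h2, incl]
    simp only [canon, seg_self, List.map_nil, List.nil_append, List.map_append,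
      List.map_cons, List.map_nil, List.append_assoc, List.cons_append]
    by_cases h3 : ic = ec
    · subst h3
      simp only [ne_eq, not_true_eq_false, ite_false, List.append_nil, seg_self,
        List.map_nil, List.nil_append]
      rw [exm sr er (fun r => (r, ic))]
    · rw [if_pos h3, exmL sr er (fun r => (r, ic)), exm ic ec (fun c => (er, c))]
  · -- sr ≠ ir, ir = er
    subst h2
    rw [if_neg h1, if_pos rfl, incl]
    simp only [canon, List.map_nil, List.nil_append, List.map_append,
      List.map_cons, List.map_nil, List.append_assoc, List.cons_append]
    rw [exmL sc ic (fun c => (ir, c)), exm ic ec (fun c => (ir, c)), seg_self]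
    simp
  · -- sr ≠ ir, ir ≠ er
    rw [if_neg h1, if_neg h2, incl]
    simp only [canon, List.map_nil, List.nil_append, List.map_append,
      List.map_cons, List.map_nil, List.append_assoc, List.cons_append]
    by_cases h3 : ic = ec
    · subst h3
      simp only [ne_eq, not_true_eq_false, ite_false, List.append_nil, seg_self,
        List.map_nil, List.nil_append]
      rw [exmL sc ic (fun c => (ir, c)), exm ir er (fun r => (r, ic))]
    · rw [if_pos h3, exmL sc ic (fun c => (ir, c)), exmL ir er (fun r => (r, ic)),
         exm ic ec (fun c => (er, c))]

-- ===== VERDICT (by name: the statement is the Claim_ definition above) =====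
theorem mikami_reconstruct_path_py_spec : Claim_equal_mikami_reconstruct_path_py := by
  intro sr sc er ec intersect _
  obtain ⟨ir, ic⟩ := intersect
  unfold Spec_mikami_reconstruct_path_py mikami_reconstruct_path_py mikami_reconstruct_path_py_alt
  simp only [List.zip, List.tail, List.zipWith]
  rw [a_path, b_path]
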